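-- pv_equiv track=rewrite | github.com/branpk/sm64-flight | flight/old_best_approach.py | get_metric_from_heights
-- ===== SOURCE A (Python) =====
-- def get_peaks(heights):
--   running_maxes = []
--   current_max = None
--   current_min = heights[0]
--   for height in heights:
--     if current_max is not None and height < current_max - 100:
--       # if len(running_maxes) == 0 or current_max > running_maxes[-1]:
--       running_maxes.append(current_max)
--       current_min = height
--       current_max = None
--     if current_min is not None and height > current_min + 100:
--       current_min = None
--       current_max = height
--     if current_max is not None:
--       current_max = max(height, current_max)
--     if current_min is not None:
--       current_min = min(height, current_min)
--   return running_maxes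
--
-- def get_metric_from_heights(heights):
--   # first_descending_peak = None
--   # max_peak = 0
--   # for peak in get_peaks(heights):
--   #   if peak < max_peak:
--   #     first_descending_peak = peak
--   #     break
--   #   else:
--   #     max_peak = peak
--   peaks = get_peaks(heights)
--   peak_prefix = []
--   for peak in peaks:
--     if len(peak_prefix) == 0 or peak > peak_prefix[-1]:
--       peak_prefix.append(peak)
--     else:
--       peak_prefix.append(peak)
--       break
--   # peak_diff = float('inf') if len(peaks) < 2 else max(peaks) - min(peaks)
--   # return -peak_diff, max(heights) #len(heights) #, first_descending_peak or 0 #max(heights), len(heights), first_descending_peak or 0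
--   return max(heights), peak_prefix, len(heights)
-- ===== SOURCE B (Python) =====
-- def get_metric_from_heights(heights):
--     # Single streaming pass: a two-mode (ascending/descending) state machine
--     # feeds each completed peak straight into the prefix rule, breaking as soon
--     # as the prefix stops strictly increasing.  max/len come from the builtins.
--     prefix = []
--     up = False
--     bound = heights[0]
--     for h in heights:
--         if up:
--             if h < bound - 100:
--                 if prefix and bound <= prefix[-1]:
--                     prefix.append(bound)
--                     break
--                 prefix.append(bound)
--                 up = False
--                 bound = h
--             else:
--                 bound = max(bound, h)
--         elif h > bound + 100:
--             up = True
--             bound = h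
--         else:
--             bound = min(bound, h)
--     return max(heights), prefix, len(heights)
-- ===== Notes on version B (the rewrite author's own statement) =====
-- stated objective: alternative
-- what changed: Fuses A's two-pass structure (build the full peaks list with get_peaks, then scan it for the ascending prefix) into one streaming pass: a two-mode ascending/descending state machine without Optionals feeds each completed peak directly into the prefix rule and the loop breaks as soon as the prefix stops strictly increasing, so later peaks are never materialised.
import Mathlib
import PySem

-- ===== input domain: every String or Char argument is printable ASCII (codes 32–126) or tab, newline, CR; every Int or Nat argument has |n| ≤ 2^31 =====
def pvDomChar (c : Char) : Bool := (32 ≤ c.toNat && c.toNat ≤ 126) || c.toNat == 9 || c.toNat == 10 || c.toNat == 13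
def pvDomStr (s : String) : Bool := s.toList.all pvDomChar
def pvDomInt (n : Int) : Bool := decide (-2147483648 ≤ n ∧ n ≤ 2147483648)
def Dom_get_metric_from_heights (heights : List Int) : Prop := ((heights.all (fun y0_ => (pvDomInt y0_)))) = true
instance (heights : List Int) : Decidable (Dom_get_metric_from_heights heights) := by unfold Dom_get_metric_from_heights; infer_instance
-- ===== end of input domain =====

-- B fuses A's two passes (get_peaks, then prefix scan) into one streaming two-mode pass with early break; alternative decomposition, same cost.


-- ===== PORT A =====
-- one iteration of get_peaks' loop body, state = (running_maxes, current_max, current_min)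
def pvStepA (s : List Int × Option Int × Option Int) (h : Int) : List Int × Option Int × Option Int :=
  let rm := s.1
  let cmax := s.2.1
  let cmin := s.2.2
  -- if current_max is not None and height < current_max - 100
  let t1 : List Int × Option Int × Option Int :=
    match cmax with
    | some m => if h < m - 100 then (rm ++ [m], none, some h) else (rm, some m, cmin)
    | none => (rm, none, cmin)
  let rm := t1.1
  let cmax := t1.2.1
  let cmin := t1.2.2
  -- if current_min is not None and height > current_min + 100
  let t2 : Option Int × Option Int :=
    match cmin with
    | some mn => if h > mn + 100 then (some h, none) else (cmax, some mn)
    | none => (cmax, none)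
  let cmax := t2.1
  let cmin := t2.2
  -- if current_max is not None: current_max = max(height, current_max)
  let cmax : Option Int := match cmax with | some m => some (max h m) | none => none
  -- if current_min is not None: current_min = min(height, current_min)
  let cmin : Option Int := match cmin with | some mn => some (min h mn) | none => none
  (rm, cmax, cmin)

def get_peaks (heights : List Int) : List Int :=
  match PySem.List.pyGet? heights 0 with
  | none => []   -- Python raises IndexError here; excluded by Pre_
  | some h0 => (heights.foldl pvStepA ([], none, some h0)).1

-- the 'for peak in peaks: … break' prefix loop of A
def pvPrefA (acc : List Int) : List Int → List Int
  | [] => acc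
  | p :: ps =>
    match acc.getLast? with
    | none => pvPrefA (acc ++ [p]) ps
    | some l => if p > l then pvPrefA (acc ++ [p]) ps else acc ++ [p]

def get_metric_from_heights (heights : List Int) : Int × List Int × Int :=
  let peaks := get_peaks heights
  let peak_prefix := pvPrefA [] peaks
  ((PySem.List.max? heights (fun x => x)).getD 0, peak_prefix, (heights.length : Int))
  -- max([]) would raise ValueError; excluded by Pre_

-- ===== PORT B =====
-- the single streaming loop of B: up/bound is the state machine, pref the growing prefix; returning stops the loop (break)
def pvLoopB (hs : List Int) (up : Bool) (bound : Int) (pref : List Int) : List Int :=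
  match hs with
  | [] => pref
  | h :: rest =>
    if up then
      if h < bound - 100 then
        match pref.getLast? with
        | some l =>
          if bound ≤ l then pref ++ [bound]
          else pvLoopB rest false h (pref ++ [bound])
        | none => pvLoopB rest false h (pref ++ [bound])
      else pvLoopB rest true (max bound h) pref
    else
      if h > bound + 100 then pvLoopB rest true h pref
      else pvLoopB rest false (min bound h) pref

def get_metric_from_heights_alt (heights : List Int) : Int × List Int × Int :=
  match heights with
  | [] => (0, [], 0)   -- Python raises IndexError here; excluded by Pre_
  | h0 :: _ =>
    ((PySem.List.max? heights (fun x => x)).getD 0, pvLoopB heights false h0 [], (heights.length : Int))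

-- ===== PRECONDITION & SPEC =====
-- Pre_ excludes only the empty list, on which both Pythons raise (IndexError on heights[0]).
def Pre_get_metric_from_heights (heights : List Int) : Prop := heights ≠ []
instance (heights : List Int) : Decidable (Pre_get_metric_from_heights heights) := by unfold Pre_get_metric_from_heights; infer_instance
def pvWitness_get_metric_from_heights : List Int := [0]

def Spec_get_metric_from_heights (heights : List Int) (out : Int × List Int × Int) : Prop := out = get_metric_from_heights_alt heights
instance (heights : List Int) (out : Int × List Int × Int) : Decidable (Spec_get_metric_from_heights heights out) := by unfold Spec_get_metric_from_heights; infer_instance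

-- ===== CLAIM (what is proved, stated in full; the proofs are below) =====
def Claim_equal_get_metric_from_heights : Prop := ∀ (heights : List Int), Dom_get_metric_from_heights heights → Pre_get_metric_from_heights heights → Spec_get_metric_from_heights heights (get_metric_from_heights heights)

-- ===== LEMMAS AND PROOFS =====

-- 'A-state' corresponding to B's (up, bound)
def pvModeSt (up : Bool) (v : Int) : Option Int × Option Int :=
  if up then (some v, none) else (none, some v)

-- the foldl accumulator only grows: running_maxes factors out
theorem pvFoldA_acc (hs : List Int) : ∀ (rm : List Int) (st : Option Int × Option Int),
    (hs.foldl pvStepA (rm, st)).1 = rm ++ (hs.foldl pvStepA ([], st)).1 := by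
  induction hs with
  | nil => intro rm st; simp
  | cons h t ih =>
    intro rm st
    have hstep : pvStepA (rm, st) h =
        (rm ++ (pvStepA ([], st) h).1, (pvStepA ([], st) h).2) := by
      obtain ⟨cmax, cmin⟩ := st
      cases cmax <;> cases cmin <;> simp [pvStepA] <;> split_ifs <;> simp
    simp only [List.foldl_cons, hstep]
    rw [ih (rm ++ (pvStepA ([], st) h).1), ih (pvStepA ([], st) h).1]
    simp

-- the core correspondence: B's fused loop computes the prefix of A's emitted peaks
theorem pvLoopB_eq (hs : List Int) : ∀ (up : Bool) (v : Int) (pref : List Int),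
    pvLoopB hs up v pref = pvPrefA pref (hs.foldl pvStepA ([], pvModeSt up v)).1 := by
  induction hs with
  | nil => intro up v pref; simp [pvLoopB, pvPrefA]
  | cons h t ih =>
    intro up v pref
    cases up with
    | false =>
      by_cases hc : h > v + 100
      · have : pvStepA ([], pvModeSt false v) h = ([], pvModeSt true h) := by
          simp [pvStepA, pvModeSt, hc]
        simp only [List.foldl_cons, this, pvLoopB, hc, if_pos, ih]
        simp
      · have : pvStepA ([], pvModeSt false v) h = ([], pvModeSt false (min h v)) := by
          simp [pvStepA, pvModeSt, hc]
        simp only [List.foldl_cons, this]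
        simp only [pvLoopB, Bool.false_eq_true, if_false, hc, ih]
        simp [min_comm]
    | true =>
      by_cases hc : h < v - 100
      · have hstep : pvStepA ([], pvModeSt true v) h = ([v], pvModeSt false h) := by
          simp [pvStepA, pvModeSt, hc]
        have hacc := pvFoldA_acc t [v] (pvModeSt false h)
        simp only [List.foldl_cons, hstep, hacc]
        cases hl : pref.getLast? with
        | none =>
          simp only [pvLoopB, hc, if_pos, hl, ih, List.singleton_append, pvPrefA]
        | some l =>
          by_cases hle : v ≤ l
          · simp only [pvLoopB, hc, if_pos, hl, hle, if_pos, List.singleton_append, pvPrefA]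
            simp [hle]
          · simp only [pvLoopB, hc, if_pos, hl, hle, ih, List.singleton_append, pvPrefA]
            simp
            intro hcon; omega
      · have : pvStepA ([], pvModeSt true v) h = ([], pvModeSt true (max h v)) := by
          simp [pvStepA, pvModeSt, hc]
        simp only [List.foldl_cons, this]
        simp only [pvLoopB, if_pos, hc, ih]
        simp [max_comm]

-- ===== VERDICT (by name: the statement is the Claim_ definition above) =====
theorem get_metric_from_heights_spec : Claim_equal_get_metric_from_heights := by
  intro heights _ hpre
  unfold Spec_get_metric_from_heights
  match heights with
  | [] => exact absurd rfl hpre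
  | h0 :: t =>
    have hget : PySem.List.pyGet? (h0 :: t) 0 = some h0 := by
      simp [PySem.List.pyGet?, PySem.List.pyIdx?]
    have := pvLoopB_eq (h0 :: t) false h0 []
    simp only [get_metric_from_heights, get_metric_from_heights_alt, get_peaks, hget,
      this, pvModeSt, Bool.false_eq_true, if_false]
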